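-- pv_equiv track=rewrite | github.com/dh7hong/algorithms-level-facebook | 164_n-represent.py | solution
-- ===== SOURCE A (Python) =====
-- def solution(N, number):
--     if N == number:
--         return 1
--
--     # dp[k] = numbers that can be made using k Ns
--     dp = [set() for _ in range(9)]
--
--     for k in range(1, 9):
--         # Concatenated number (e.g., 5, 55, 555)
--         dp[k].add(int(str(N) * k))
--
--         for i in range(1, k):
--             for a in dp[i]:
--                 for b in dp[k - i]:
--                     dp[k].add(a + b)
--                     dp[k].add(a - b)
--                     dp[k].add(a * b)
--                     if b != 0:
--                         dp[k].add(a // b)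
--
--         if number in dp[k]:
--             return k
--
--     return -1
-- ===== SOURCE B (Python) =====
-- def combine(xs, ys):
--     out = set()
--     for a in xs:
--         for b in ys:
--             out.add(a + b)
--             out.add(a - b)
--             out.add(a * b)
--             if b != 0:
--                 out.add(a // b)
--     return out
--
--
-- def solution(N, number):
--     if N == number:
--         return 1
--
--     cache = {}
--
--     def reach(k):
--         # set of values obtainable with exactly k copies of N
--         if k in cache:
--             return cache[k]
--         s = {int(str(N) * k)}
--         for i in range(1, k):
--             s |= combine(reach(i), reach(k - i))
--         cache[k] = s
--         return s
--
--     for k in range(1, 9):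
--         if number in reach(k):
--             return k
--     return -1
-- ===== Notes on version B (the rewrite author's own statement) =====
-- stated objective: alternative
-- what changed: Bottom-up dp array of 9 sets mutated in place is replaced by a top-down memoized recursion reach(k) with the pair-combination loop factored into a separate combine helper that returns a fresh set merged by set-union.
import Mathlib
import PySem

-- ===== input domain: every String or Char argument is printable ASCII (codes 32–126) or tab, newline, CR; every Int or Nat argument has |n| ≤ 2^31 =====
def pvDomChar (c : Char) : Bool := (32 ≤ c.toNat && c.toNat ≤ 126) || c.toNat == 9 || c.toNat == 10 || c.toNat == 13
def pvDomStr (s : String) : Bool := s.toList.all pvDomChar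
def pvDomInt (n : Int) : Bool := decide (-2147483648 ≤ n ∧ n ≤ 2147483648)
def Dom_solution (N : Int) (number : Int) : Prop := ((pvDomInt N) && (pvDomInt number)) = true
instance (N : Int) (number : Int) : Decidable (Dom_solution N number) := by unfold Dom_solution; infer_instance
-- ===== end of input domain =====

-- B replaces A's bottom-up dp array (mutated in place, early return inside the k-loop) by a
-- top-down memoized recursion reach(k) with a factored-out combine helper; same values, no speed claim.
-- Both ports model the internal Python sets as Std.HashSet Int (the results depend on the sets only
-- through membership, never through iteration order).

-- ===== PORT A =====
-- int(str(N) * k); Python raises ValueError where ofChars? is none (N < 0, k ≥ 2) — excluded by Pre_.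
def pvConcat (N : Int) (k : Nat) : Int :=
  (PySem.Int.ofChars? (List.flatten (List.replicate k (PySem.Int.toChars N)))).getD 0

-- the 'for k in range(1,9)' loop of A, threading the dp list of 9 sets; early return = stop recursing
def solutionGo (N : Int) (number : Int) (dp : List (Std.HashSet Int)) : List Nat → Int
  | [] => -1
  | k :: ks =>
    let dpk :=
      (List.range' 1 (k-1)).foldl (fun s i =>
        (dp.getD i ∅).toList.foldl (fun s a =>
          (dp.getD (k-i) ∅).toList.foldl (fun s b =>
            let s := ((s.insert (a+b)).insert (a-b)).insert (a*b)
            if b ≠ 0 then s.insert (PySem.Int.floordiv a b) else s) s) s)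
        ((dp.getD k ∅).insert (pvConcat N k))
    if dpk.contains number then (k : Int)
    else solutionGo N number (dp.set k dpk) ks

def solution (N : Int) (number : Int) : Int :=
  if N = number then 1
  else solutionGo N number (List.replicate 9 ∅) (List.range' 1 8)

-- ===== PORT B =====
def pvCombine (xs ys : Std.HashSet Int) : Std.HashSet Int :=
  xs.toList.foldl (fun out a =>
    ys.toList.foldl (fun out b =>
      let out := ((out.insert (a+b)).insert (a-b)).insert (a*b)
      if b ≠ 0 then out.insert (PySem.Int.floordiv a b) else out) out) ∅

-- reach(k): Source B's memo cache is pure memoization (same values); ported as direct recursion on k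
def pvReach (N : Int) (k : Nat) : Std.HashSet Int :=
  (List.range' 1 (k-1)).attach.foldl
    (fun s i => (pvCombine (pvReach N i.1) (pvReach N (k - i.1))).toList.foldl
                  (fun s x => s.insert x) s)
    ((∅ : Std.HashSet Int).insert (pvConcat N k))
termination_by k
decreasing_by
  · have h := List.mem_range'_1.mp i.2; omega
  · have h := List.mem_range'_1.mp i.2; omega

def altGo (N : Int) (number : Int) : List Nat → Int
  | [] => -1
  | k :: ks => if (pvReach N k).contains number then (k : Int) else altGo N number ks

def solution_alt (N : Int) (number : Int) : Int :=
  if N = number then 1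
  else altGo N number (List.range' 1 8)

-- ===== PRECONDITION & SPEC =====
-- Pre_ excludes exactly the inputs where Python A raises ValueError: N < 0 with number ≠ N
-- (int(str(N)*k) for k ≥ 2 parses "-5-5"); Python B raises there too.
def Pre_solution (N : Int) (number : Int) : Prop := 0 ≤ N ∨ N = number
instance (N : Int) (number : Int) : Decidable (Pre_solution N number) := by unfold Pre_solution; infer_instance
def pvWitness_solution : Int × Int := (5, 12)

def Spec_solution (N : Int) (number : Int) (out : Int) : Prop := out = solution_alt N number
instance (N : Int) (number : Int) (out : Int) : Decidable (Spec_solution N number out) := by unfold Spec_solution; infer_instance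

-- ===== CLAIM (what is proved, stated in full; the proofs are below) =====
def Claim_equal_solution : Prop := ∀ (N : Int) (number : Int), Dom_solution N number → Pre_solution N number → Spec_solution N number (solution N number)

-- ===== LEMMAS AND PROOFS =====

-- membership through a fold that only ADDS elements described by P
theorem pv_mem_foldl {β : Type} (l : List β) (f : Std.HashSet Int → β → Std.HashSet Int)
    (P : β → Int → Prop) (hf : ∀ s b x, x ∈ f s b ↔ x ∈ s ∨ P b x) :
    ∀ (s : Std.HashSet Int) (x : Int), x ∈ l.foldl f s ↔ x ∈ s ∨ ∃ b ∈ l, P b x := by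
  induction l with
  | nil => simp
  | cons b l ih =>
    intro s x
    simp only [List.foldl_cons, ih, hf, List.mem_cons]
    constructor
    · rintro ((h | h) | ⟨c, hc, h⟩)
      · exact Or.inl h
      · exact Or.inr ⟨b, Or.inl rfl, h⟩
      · exact Or.inr ⟨c, Or.inr hc, h⟩
    · rintro (h | ⟨c, (rfl | hc), h⟩)
      · exact Or.inl (Or.inl h)
      · exact Or.inl (Or.inr h)
      · exact Or.inr ⟨c, hc, h⟩

-- the values added by the innermost body for one pair (a, b)
def pvQ (a b x : Int) : Prop :=
  a + b = x ∨ a - b = x ∨ a * b = x ∨ (b ≠ 0 ∧ PySem.Int.floordiv a b = x)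

theorem pv_mem_inner (a : Int) (ys : List Int) (s : Std.HashSet Int) (x : Int) :
    x ∈ ys.foldl (fun s b =>
        let s' := ((s.insert (a+b)).insert (a-b)).insert (a*b)
        if b ≠ 0 then s'.insert (PySem.Int.floordiv a b) else s') s
      ↔ x ∈ s ∨ ∃ b ∈ ys, pvQ a b x := by
  apply pv_mem_foldl _ _ (fun b x => pvQ a b x)
  intro s b x
  by_cases hb : b = 0 <;>
    simp [hb, pvQ, Std.HashSet.mem_insert] <;> tauto

theorem pv_mem_pair (xsl ysl : List Int) (s : Std.HashSet Int) (x : Int) :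
    x ∈ xsl.foldl (fun s a =>
        ysl.foldl (fun s b =>
          let s' := ((s.insert (a+b)).insert (a-b)).insert (a*b)
          if b ≠ 0 then s'.insert (PySem.Int.floordiv a b) else s') s) s
      ↔ x ∈ s ∨ ∃ a ∈ xsl, ∃ b ∈ ysl, pvQ a b x := by
  apply pv_mem_foldl _ _ (fun a x => ∃ b ∈ ysl, pvQ a b x)
  intro s a x
  exact pv_mem_inner a ysl s x

theorem pv_mem_combine (xs ys : Std.HashSet Int) (x : Int) :
    x ∈ pvCombine xs ys ↔ ∃ a ∈ xs, ∃ b ∈ ys, pvQ a b x := by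
  unfold pvCombine
  rw [pv_mem_pair]
  simp [Std.HashSet.not_mem_empty, Std.HashSet.mem_toList]

-- one unfolding of pvReach at the membership level
theorem pv_mem_reach (N : Int) (k : Nat) (x : Int) :
    x ∈ pvReach N k ↔
      pvConcat N k = x ∨
      ∃ i ∈ List.range' 1 (k-1), ∃ a ∈ pvReach N i, ∃ b ∈ pvReach N (k-i), pvQ a b x := by
  rw [pvReach]
  rw [pv_mem_foldl _ _ (fun (i : {i // i ∈ List.range' 1 (k-1)}) x =>
        x ∈ pvCombine (pvReach N i.1) (pvReach N (k - i.1)))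
      (by
        intro s b x
        rw [pv_mem_foldl _ _ (fun (y : Int) x => y = x)
            (by intro s y x; rw [Std.HashSet.mem_insert, beq_iff_eq]; tauto)]
        simp [Std.HashSet.mem_toList])]
  constructor
  · rintro (h | ⟨⟨i, hi⟩, _, h⟩)
    · left
      rcases (Std.HashSet.mem_insert.mp h) with h' | h'
      · exact eq_of_beq h'
      · exact absurd h' (Std.HashSet.not_mem_empty)
    · right; exact ⟨i, hi, (pv_mem_combine _ _ _).mp h⟩
  · rintro (h | ⟨i, hi, h⟩)
    · left; exact Std.HashSet.mem_insert.mpr (Or.inl (beq_iff_eq.mpr h))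
    · right; exact ⟨⟨i, hi⟩, List.mem_attach _ _, (pv_mem_combine _ _ _).mpr h⟩

-- the dp invariant after processing levels 1..m
def pvInv (N : Int) (dp : List (Std.HashSet Int)) (m : Nat) : Prop :=
  ∀ j x, x ∈ dp.getD j ∅ ↔ (1 ≤ j ∧ j ≤ m ∧ x ∈ pvReach N j)

theorem pv_step (N : Int) (dp : List (Std.HashSet Int)) (m : Nat) (hm : m + 1 ≤ 8)
    (hinv : pvInv N dp m) (x : Int) :
    x ∈ (List.range' 1 ((m+1)-1)).foldl (fun s i =>
        (dp.getD i ∅).toList.foldl (fun s a =>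
          (dp.getD ((m+1)-i) ∅).toList.foldl (fun s b =>
            let s := ((s.insert (a+b)).insert (a-b)).insert (a*b)
            if b ≠ 0 then s.insert (PySem.Int.floordiv a b) else s) s) s)
        ((dp.getD (m+1) ∅).insert (pvConcat N (m+1)))
      ↔ x ∈ pvReach N (m+1) := by
  rw [pv_mem_foldl _ _
      (fun i x => ∃ a ∈ (dp.getD i ∅).toList, ∃ b ∈ (dp.getD ((m+1)-i) ∅).toList, pvQ a b x)
      (by intro s i x; exact pv_mem_pair _ _ s x)]
  rw [pv_mem_reach]
  have hbase : x ∈ (dp.getD (m+1) ∅).insert (pvConcat N (m+1)) ↔ pvConcat N (m+1) = x := by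
    rw [Std.HashSet.mem_insert]
    constructor
    · rintro (h | h)
      · exact eq_of_beq h
      · exact absurd ((hinv _ _).mp h) (by omega)
    · exact fun h => Or.inl (beq_iff_eq.mpr h)
  rw [hbase]
  constructor
  · rintro (h | ⟨i, hi, a, ha, b, hb, h⟩)
    · exact Or.inl h
    · rw [Std.HashSet.mem_toList] at ha hb
      exact Or.inr ⟨i, hi, a, ((hinv _ _).mp ha).2.2, b, ((hinv _ _).mp hb).2.2, h⟩
  · rintro (h | ⟨i, hi, a, ha, b, hb, h⟩)
    · exact Or.inl h
    · have hi' := List.mem_range'_1.mp hi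
      refine Or.inr ⟨i, hi, a, ?_, b, ?_, h⟩
      · rw [Std.HashSet.mem_toList]; exact (hinv _ _).mpr ⟨by omega, by omega, ha⟩
      · rw [Std.HashSet.mem_toList]; exact (hinv _ _).mpr ⟨by omega, by omega, hb⟩

theorem pv_go_eq (N : Int) (number : Int) :
    ∀ (n m : Nat), m + n = 8 → ∀ dp : List (Std.HashSet Int), dp.length = 9 → pvInv N dp m →
      solutionGo N number dp (List.range' (m+1) n) = altGo N number (List.range' (m+1) n) := by
  intro n
  induction n with
  | zero => intro m _ dp _ _; rfl
  | succ n ih =>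
    intro m hm dp hlen hinv
    rw [List.range'_succ]
    set dpk := (List.range' 1 ((m+1)-1)).foldl (fun s i =>
        (dp.getD i ∅).toList.foldl (fun s a =>
          (dp.getD ((m+1)-i) ∅).toList.foldl (fun s b =>
            let s := ((s.insert (a+b)).insert (a-b)).insert (a*b)
            if b ≠ 0 then s.insert (PySem.Int.floordiv a b) else s) s) s)
        ((dp.getD (m+1) ∅).insert (pvConcat N (m+1))) with hdpk
    have hstep := pv_step N dp m (by omega) hinv
    show (if dpk.contains number then ((m+1 : Nat) : Int)
          else solutionGo N number (dp.set (m+1) dpk) (List.range' (m+1+1) n)) = _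
    rw [altGo]
    have hcond : dpk.contains number = (pvReach N (m+1)).contains number := by
      rw [Bool.eq_iff_iff, Std.HashSet.contains_iff_mem, Std.HashSet.contains_iff_mem]
      exact hstep number
    rw [hcond]
    by_cases hb : (pvReach N (m+1)).contains number = true
    · rw [if_pos hb, if_pos hb]
    · rw [if_neg hb, if_neg hb]
      have hinv' : pvInv N (dp.set (m+1) dpk) (m+1) := by
        intro j x
        have hget : (dp.set (m+1) dpk).getD j ∅
            = if j = m+1 then dpk else dp.getD j ∅ := by
          by_cases h : j = m + 1
          · subst h
            rw [if_pos rfl]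
            have hj : m + 1 < dp.length := by omega
            simp [List.getD_eq_getElem?_getD, hj]
          · rw [if_neg h]
            simp [List.getD_eq_getElem?_getD, List.getElem?_set_ne (fun hh => h hh.symm)]
        rw [hget]
        split
        · next h =>
            subst h; rw [hstep]
            exact ⟨fun hx => ⟨by omega, le_refl _, hx⟩, fun hx => hx.2.2⟩
        · next h =>
            rw [hinv j x]
            exact ⟨fun ⟨h1, h2, h3⟩ => ⟨h1, by omega, h3⟩,
              fun ⟨h1, h2, h3⟩ => ⟨h1, by omega, h3⟩⟩
      have := ih (m+1) (by omega) (dp.set (m+1) dpk) (by simp [hlen]) hinv'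
      exact this

-- ===== VERDICT (by name: the statement is the Claim_ definition above) =====
theorem solution_spec : Claim_equal_solution := by
  intro N number _ _
  unfold Spec_solution solution solution_alt
  by_cases h : N = number
  · simp [h]
  · rw [if_neg h, if_neg h]
    have h0 : (List.range' 1 8) = List.range' (0+1) 8 := rfl
    rw [h0]
    apply pv_go_eq N number 8 0 rfl
    · simp
    · intro j x
      constructor
      · intro hx
        exfalso
        have hrep : (List.replicate 9 (∅ : Std.HashSet Int)).getD j ∅ = ∅ := by
          rw [List.getD_eq_getElem?_getD]
          cases hg : (List.replicate 9 (∅ : Std.HashSet Int))[j]? with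
          | none => rfl
          | some s =>
              have hmem := List.mem_of_getElem? hg
              rw [List.eq_of_mem_replicate hmem]
              rfl
        rw [hrep] at hx
        exact Std.HashSet.not_mem_empty hx
      · rintro ⟨_, h2, _⟩; omega
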